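-- pv_equiv track=rewrite | github.com/sgorawski/University | term6/artificial-intelligence/lab1/task4.py | opt_dist
-- ===== SOURCE A (Python) =====
-- def opt_dist(digits, n):
--     """Based on a sliding window, idea:
--     for all possible window positions find a min value
--     of flips of digits inside window to 1
--     and flips outside window to 0.
--     """
--     total_num_1s = sum(digits)
--     num_1s_in_window = sum(digits[:n])
--     least_flips = (n - num_1s_in_window) + (total_num_1s - num_1s_in_window)
--     for start, end in zip(digits, digits[n:]):
--         num_1s_in_window -= start
--         num_1s_in_window += end
--         least_flips = min(
--             (n - num_1s_in_window) + (total_num_1s - num_1s_in_window),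
--             least_flips
--         )
--     return least_flips
-- ===== SOURCE B (Python) =====
-- def opt_dist(digits, n):
--     """A window with w ones costs (n - w) + (total - w) flips, so the cheapest
--     window is the one with the most ones; window sums are read off a prefix-sum
--     array (window length capped at the array length)."""
--     length = len(digits)
--     w = min(n, length)
--     prefix = [0]
--     s = 0
--     for d in digits:
--         s += d
--         prefix.append(s)
--     total = s
--     best = max(prefix[i + w] - prefix[i] for i in range(length - w + 1))
--     return n + total - 2 * best
-- ===== Notes on version B (the rewrite author's own statement) =====
-- stated objective: alternative
-- what changed: Replaces A's running sliding-window accumulator over zip(digits, digits[n:]) with a prefix-sum array and a max: minimizing flips equals maximizing ones inside the window, so B returns n + total - 2 * (max window sum); Pre_ excludes negative n, which is not a meaningful window length and on which A's value is an accident of Python negative-slice wraparound.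
-- outside the precondition, e.g. on opt_dist([1, 0, 1], -1): A returns -1, B raises IndexError
import Mathlib
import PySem

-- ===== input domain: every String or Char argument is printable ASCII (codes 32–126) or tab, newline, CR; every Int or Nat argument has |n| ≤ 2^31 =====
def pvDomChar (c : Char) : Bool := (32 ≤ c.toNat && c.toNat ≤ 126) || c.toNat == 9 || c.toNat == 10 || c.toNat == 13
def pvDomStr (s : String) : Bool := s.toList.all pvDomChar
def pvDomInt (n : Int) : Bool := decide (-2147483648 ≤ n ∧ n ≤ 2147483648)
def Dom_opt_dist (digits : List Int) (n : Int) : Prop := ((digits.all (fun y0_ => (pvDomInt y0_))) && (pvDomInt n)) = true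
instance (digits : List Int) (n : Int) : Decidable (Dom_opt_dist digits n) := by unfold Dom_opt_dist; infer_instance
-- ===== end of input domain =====

-- B turns the window minimization into a maximization of window ones over a prefix-sum
-- array (objective: alternative, same cost); proved equal to A for all n ≥ 0.

-- ===== PORT A =====
def opt_dist (digits : List Int) (n : Int) : Int :=
  let total := digits.sum
  let w0 := (PySem.List.slice digits none (some n)).sum
  let least0 := (n - w0) + (total - w0)
  (List.foldl (fun (st : Int × Int) (p : Int × Int) =>
      let w := st.1 - p.1 + p.2
      (w, min ((n - w) + (total - w)) st.2))
    (w0, least0) (digits.zip (PySem.List.slice digits (some n) none))).2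

-- ===== PORT B =====
def opt_dist_alt (digits : List Int) (n : Int) : Int :=
  let length : Int := digits.length
  let w := min n length
  let st := digits.foldl (fun (acc : List Int × Int) d => (acc.1 ++ [acc.2 + d], acc.2 + d)) ([0], 0)
  let pre := st.1
  let total := st.2
  let best := (PySem.List.max?
      ((PySem.List.pyRange 0 (length - w + 1) 1).map
        (fun i => (PySem.List.pyGet? pre (i + w)).getD 0 - (PySem.List.pyGet? pre i).getD 0))
      (fun x => x)).getD 0   -- max(...) of a nonempty sequence whenever n ≥ 0 (the Python never sees it empty there)
  n + total - 2 * best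

-- ===== PRECONDITION & SPEC =====
-- Pre_ excludes negative n: a negative window length is outside the task's natural domain,
-- and A's value there is an accident of Python's negative-slice wraparound (B raises IndexError).
def Pre_opt_dist (digits : List Int) (n : Int) : Prop := 0 ≤ n
instance (digits : List Int) (n : Int) : Decidable (Pre_opt_dist digits n) := by unfold Pre_opt_dist; infer_instance
def pvWitness_opt_dist : List Int × Int := ([1, 0, 1], 2)
def Spec_opt_dist (digits : List Int) (n : Int) (out : Int) : Prop := out = opt_dist_alt digits n
instance (digits : List Int) (n : Int) (out : Int) : Decidable (Spec_opt_dist digits n out) := by unfold Spec_opt_dist; infer_instance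

-- ===== CLAIM (what is proved, stated in full; the proofs are below) =====
def Claim_equal_opt_dist : Prop := ∀ (digits : List Int) (n : Int), Dom_opt_dist digits n → Pre_opt_dist digits n → Spec_opt_dist digits n (opt_dist digits n)

-- ===== LEMMAS AND PROOFS =====

-- abbreviation used throughout: S digits k = sum of the first k digits
def pvS (digits : List Int) (k : Nat) : Int := (digits.take k).sum

theorem pvS_succ (digits : List Int) (k : Nat) (hk : k < digits.length) :
    pvS digits (k + 1) = pvS digits k + digits.getD k 0 := by
  unfold pvS
  rw [List.take_add_one, List.sum_append, List.getElem?_eq_getElem hk,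
      List.getD_eq_getElem digits 0 hk]
  simp

-- the prefix-building fold of B, characterised
theorem pv_prefix_fold (ds : List Int) : ∀ (p : List Int) (s : Int),
    ds.foldl (fun (acc : List Int × Int) d => (acc.1 ++ [acc.2 + d], acc.2 + d)) (p, s)
      = (p ++ (List.range ds.length).map (fun k => s + (ds.take (k + 1)).sum), s + ds.sum) := by
  induction ds with
  | nil => intro p s; simp
  | cons d ds ih =>
      intro p s
      simp only [List.foldl_cons, ih (p ++ [s + d]) (s + d)]
      simp only [Prod.mk.injEq]
      refine ⟨?_, by simp; ring⟩
      rw [List.append_assoc]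
      congr 1
      rw [List.length_cons, List.range_succ_eq_map, List.map_cons, List.map_map]
      simp only [List.singleton_append, List.take_succ_cons, List.sum_cons]
      congr 1
      · simp
      · apply List.map_congr_left
        intro k _
        simp only [Function.comp]
        ring

theorem pv_prefix_eq (digits : List Int) :
    digits.foldl (fun (acc : List Int × Int) d => (acc.1 ++ [acc.2 + d], acc.2 + d)) ([0], 0)
      = ((List.range (digits.length + 1)).map (fun k => pvS digits k), digits.sum) := by
  rw [pv_prefix_fold digits [0] 0]
  simp only [Prod.mk.injEq]
  refine ⟨?_, by simp⟩
  rw [List.range_succ_eq_map, List.map_cons, List.map_map]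
  simp only [List.singleton_append]
  congr 1
  apply List.map_congr_left
  intro k _
  simp [pvS, Function.comp]

-- zip of a list with its own drop, as a map over range
theorem pv_zip_drop {xs : List Int} {c : Nat} (hc : c ≤ xs.length) :
    xs.zip (xs.drop c)
      = (List.range (xs.length - c)).map (fun k => (xs.getD k 0, xs.getD (c + k) 0)) := by
  apply List.ext_getElem
  · simp
  · intro i h1 h2
    simp only [List.getElem_zip, List.getElem_map, List.getElem_range, List.getElem_drop]
    have hi : i < xs.length - c := by simpa using h2
    congr 1 <;> exact (List.getD_eq_getElem xs 0 (by omega)).symm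

theorem pv_slice_none_some (xs : List Int) (b : Int) :
    PySem.List.slice xs none (some b) = xs.take (PySem.List.clampIdx xs.length b) := by
  simp [PySem.List.slice]

-- A's loop invariant: the running window sum is a difference of prefix sums,
-- and the second component folds min over the window values
theorem pv_A_inv (digits : List Int) (n total : Int) (c : Nat) (hc : c ≤ digits.length) :
    ∀ (j s : Nat), s + j ≤ digits.length - c → ∀ (a : Int),
    (List.range' s j).foldl
        (fun (st : Int × Int) k =>
          (st.1 - digits.getD k 0 + digits.getD (c + k) 0,
           min ((n - (st.1 - digits.getD k 0 + digits.getD (c + k) 0))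
                + (total - (st.1 - digits.getD k 0 + digits.getD (c + k) 0))) st.2))
        (pvS digits (c + s) - pvS digits s, a)
      = (pvS digits (c + s + j) - pvS digits (s + j),
         (List.range' s j).foldl
           (fun acc k => min (n + total - 2 * (pvS digits (c + k + 1) - pvS digits (k + 1))) acc) a) := by
  intro j
  induction j with
  | zero => intro s _ a; simp
  | succ j ih =>
      intro s hs a
      rw [List.range'_succ]
      simp only [List.foldl_cons]
      have h1 : s < digits.length := by omega
      have h2 : c + s < digits.length := by omega
      have hw : pvS digits (c + s) - pvS digits s - digits.getD s 0 + digits.getD (c + s) 0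
          = pvS digits (c + s + 1) - pvS digits (s + 1) := by
        rw [pvS_succ digits s h1, pvS_succ digits (c + s) h2]; ring
      rw [hw]
      have := ih (s + 1) (by omega)
        (min ((n - (pvS digits (c + s + 1) - pvS digits (s + 1)))
              + (total - (pvS digits (c + s + 1) - pvS digits (s + 1)))) a)
      rw [show c + (s + 1) = c + s + 1 from by ring] at this
      rw [this]
      simp only [Prod.mk.injEq]
      refine ⟨by rw [show c + s + 1 + j = c + s + (j + 1) from by omega,
                     show s + 1 + j = s + (j + 1) from by omega], ?_⟩
      · congr 1
        have : (n - (pvS digits (c + s + 1) - pvS digits (s + 1)))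
            + (total - (pvS digits (c + s + 1) - pvS digits (s + 1)))
            = n + total - 2 * (pvS digits (c + s + 1) - pvS digits (s + 1)) := by ring
        rw [this]

-- fold-shift: A folds min (g (k+1)) over range' s m; the same values are min acc (g k) over range' (s+1) m
theorem pv_fold_shift (g : Nat → Int) : ∀ (m s : Nat) (a : Int),
    (List.range' s m).foldl (fun acc k => min (g (k + 1)) acc) a
      = (List.range' (s + 1) m).foldl (fun acc k => min acc (g k)) a := by
  intro m
  induction m with
  | zero => intro s a; simp
  | succ m ih =>
      intro s a
      rw [List.range'_succ, List.range'_succ]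
      simp only [List.foldl_cons]
      rw [ih (s + 1) (min (g (s + 1)) a), min_comm]

theorem pvS_zero (digits : List Int) : pvS digits 0 = 0 := by simp [pvS]

-- A, characterised: a left min-fold of the window values over window indices 0..m
theorem pv_A_eq (digits : List Int) (n : Int) :
    opt_dist digits n
      = (List.range' 0 (digits.length - PySem.List.clampIdx digits.length n)).foldl
          (fun acc k => min (n + digits.sum
              - 2 * (pvS digits (PySem.List.clampIdx digits.length n + (k + 1)) - pvS digits (k + 1))) acc)
          (n + digits.sum - 2 * pvS digits (PySem.List.clampIdx digits.length n)) := by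
  simp only [opt_dist]
  set c := PySem.List.clampIdx digits.length n with hc
  have hcle : c ≤ digits.length := PySem.List.clampIdx_le digits.length n
  rw [pv_slice_none_some, PySem.List.slice_some_none, ← hc]
  rw [pv_zip_drop hcle, List.range_eq_range', List.foldl_map]
  have key := pv_A_inv digits n digits.sum c hcle (digits.length - c) 0 (by omega)
    ((n - pvS digits c) + (digits.sum - pvS digits c))
  simp only [Nat.add_zero, Nat.zero_add, pvS_zero, sub_zero] at key
  have hgoal : (List.foldl
      (fun (x : Int × Int) (k : Nat) =>
        (x.1 - digits.getD k 0 + digits.getD (c + k) 0,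
         min ((n - (x.1 - digits.getD k 0 + digits.getD (c + k) 0))
              + (digits.sum - (x.1 - digits.getD k 0 + digits.getD (c + k) 0))) x.2))
      (pvS digits c, (n - pvS digits c) + (digits.sum - pvS digits c))
      (List.range' 0 (digits.length - c))).2
      = (List.range' 0 (digits.length - c)).foldl
          (fun acc k => min (n + digits.sum - 2 * (pvS digits (c + k + 1) - pvS digits (k + 1))) acc)
          ((n - pvS digits c) + (digits.sum - pvS digits c)) := by
    rw [key]
  rw [show (digits.take c).sum = pvS digits c from rfl, hgoal]
  congr 1
  ring

-- a min-fold of (a - 2·g k) is a - 2·(max-fold of g)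
theorem pv_fold_min_max (g : Nat → Int) (a : Int) : ∀ (l : List Nat) (b : Int),
    l.foldl (fun acc k => min acc (a - 2 * g k)) (a - 2 * b)
      = a - 2 * l.foldl (fun acc k => max acc (g k)) b := by
  intro l
  induction l with
  | nil => intro b; simp
  | cons k t ih =>
      intro b
      simp only [List.foldl_cons]
      rw [show min (a - 2 * b) (a - 2 * g k) = a - 2 * max b (g k) from by omega, ih]

-- for n ≥ 0 the clamp is (min n len).toNat
theorem pv_clamp_nonneg (L : Nat) (n : Int) (hn : 0 ≤ n) :
    ((PySem.List.clampIdx L n : Nat) : Int) = min n (L : Int) := by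
  simp only [PySem.List.clampIdx]
  split_ifs <;> omega

-- B, characterised: n + total - 2 · (left max-fold of the window sums)
theorem pv_B_eq (digits : List Int) (n : Int) (hn : 0 ≤ n) :
    opt_dist_alt digits n
      = n + digits.sum - 2 *
        ((List.range' 1 (digits.length - PySem.List.clampIdx digits.length n)).foldl
          (fun acc k => max acc (pvS digits (PySem.List.clampIdx digits.length n + k) - pvS digits k))
          (pvS digits (PySem.List.clampIdx digits.length n))) := by
  simp only [opt_dist_alt]
  rw [pv_prefix_eq digits]
  set L := digits.length with hL
  set c := PySem.List.clampIdx L n with hc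
  have hcle : c ≤ L := PySem.List.clampIdx_le L n
  have hw : min n (L : Int) = (c : Int) := (pv_clamp_nonneg L n hn).symm
  set P : List Int := (List.range (L + 1)).map (fun k => pvS digits k) with hP
  have hPlen : P.length = L + 1 := by simp [hP]
  have hPget : ∀ k : Nat, k ≤ L → (PySem.List.pyGet? P (k : Int)).getD 0 = pvS digits k := by
    intro k hk
    rw [PySem.List.pyGet?_natCast]
    rw [List.getElem?_eq_getElem (by omega : k < P.length)]
    simp [hP]
  have hm : (L : Int) - (c : Int) + 1 = ((L - c + 1 : Nat) : Int) := by push_cast; omega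
  rw [hw, hm, PySem.List.pyRange_zero_nat]
  rw [List.map_map]
  have hmap : (List.range (L - c + 1)).map
      ((fun i => (PySem.List.pyGet? P (i + (c : Int))).getD 0
            - (PySem.List.pyGet? P i).getD 0) ∘ (fun (k : Nat) => (k : Int)))
      = (List.range (L - c + 1)).map (fun k => pvS digits (c + k) - pvS digits k) := by
    apply List.map_congr_left
    intro k hk
    simp only [List.mem_range] at hk
    simp only [Function.comp_apply]
    have h1 : ((k : Nat) : Int) + (c : Int) = ((k + c : Nat) : Int) := by push_cast; ring
    rw [h1, hPget (k + c) (by omega), hPget k (by omega),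
        show k + c = c + k from by omega]
  rw [hmap]
  rw [List.range_eq_range', List.range'_succ, List.map_cons,
      PySem.List.max?_id_cons, Option.getD_some, List.foldl_map]
  simp [pvS_zero]

-- ===== VERDICT (by name: the statement is the Claim_ definition above) =====
theorem opt_dist_spec : Claim_equal_opt_dist := by
  intro digits n _ hn
  unfold Spec_opt_dist
  rw [pv_A_eq, pv_B_eq digits n hn]
  set c := PySem.List.clampIdx digits.length n
  rw [pv_fold_shift (fun k => n + digits.sum - 2 * (pvS digits (c + k) - pvS digits k))
      (digits.length - c) 0]
  have := pv_fold_min_max (fun k => pvS digits (c + k) - pvS digits k) (n + digits.sum)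
    (List.range' 1 (digits.length - c)) (pvS digits c)
  simpa [pvS_zero] using this
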